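-- pv_equiv track=rewrite | github.com/up9inc/harnic | harnic/utils.py | headers_list_to_map
-- ===== SOURCE A (Python) =====
-- from collections import defaultdict
--
-- def headers_list_to_map(headers):
--     result = defaultdict(list)
--     for header in headers:
--         name, value = header['name'], header['value']
--         result[name.lower()].append(value)
--     for value in result.values():
--         value.sort()
--     return result
-- ===== SOURCE B (Python) =====
-- from collections import defaultdict
--
--
-- def _insort(group, v):
--     # insert v into the sorted list `group`, after any equal elements
--     i = 0
--     while i < len(group) and not (v < group[i]):
--         i += 1
--     group.insert(i, v)
--
--
-- def headers_list_to_map(headers):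
--     result = defaultdict(list)
--     for header in headers:
--         _insort(result[header['name'].lower()], header['value'])
--     return result
-- ===== Notes on version B (the rewrite author's own statement) =====
-- stated objective: alternative
-- what changed: B maintains each group in sorted order incrementally, inserting every value at its sorted position in a single pass, instead of A's append-then-batch-sort of every group at the end.
import Mathlib
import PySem

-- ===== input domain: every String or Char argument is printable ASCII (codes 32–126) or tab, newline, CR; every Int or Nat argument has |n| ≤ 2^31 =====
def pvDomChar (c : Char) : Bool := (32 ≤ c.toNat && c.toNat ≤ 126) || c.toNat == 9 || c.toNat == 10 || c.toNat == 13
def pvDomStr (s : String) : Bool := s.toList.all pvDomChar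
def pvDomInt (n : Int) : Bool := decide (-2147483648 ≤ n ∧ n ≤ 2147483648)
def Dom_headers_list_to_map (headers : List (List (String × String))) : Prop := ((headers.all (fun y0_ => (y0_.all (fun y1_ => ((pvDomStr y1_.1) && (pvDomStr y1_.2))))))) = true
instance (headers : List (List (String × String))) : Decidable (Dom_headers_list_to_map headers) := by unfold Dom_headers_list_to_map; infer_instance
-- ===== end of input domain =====

-- B keeps each header group sorted incrementally (insert at sorted position, one pass)
-- instead of A's append-then-batch-sort; equivalence proved on headers whose dicts
-- carry both 'name' and 'value' keys (elsewhere A raises KeyError).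


-- ===== PORT A =====
-- loop body of A: name, value = header['name'], header['value']; result[name.lower()].append(value)
-- (a missing key is Python's KeyError: get? = none there; excluded by Pre_, the fold leaves d unchanged)
def hlmStepA (d : PySem.Dict String (List String)) (header : List (String × String)) : PySem.Dict String (List String) :=
  match (PySem.Dict.mk header).get? "name", (PySem.Dict.mk header).get? "value" with
  | some name, some value => d.modify (PySem.Str.lower name) [] (fun xs => xs ++ [value])
  | _, _ => d

def headers_list_to_map (headers : List (List (String × String))) : List (String × List String) :=
  let result := headers.foldl hlmStepA PySem.Dict.empty
  -- for value in result.values(): value.sort()   — then the dict is returned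
  result.items.map (fun p => (p.1, PySem.List.sorted p.2 (fun x => x)))

-- ===== PORT B =====
-- B's helper _insort: insert v into the sorted group after any equal elements
def insortStr (v : String) : List String → List String
  | [] => [v]
  | y :: ys => if v < y then v :: y :: ys else y :: insortStr v ys

-- loop body of B: _insort(result[header['name'].lower()], header['value'])
def hlmStepB (d : PySem.Dict String (List String)) (header : List (String × String)) : PySem.Dict String (List String) :=
  match (PySem.Dict.mk header).get? "name", (PySem.Dict.mk header).get? "value" with
  | some name, some value =>
      let key := PySem.Str.lower name
      d.insert key (insortStr value (d.getD key []))
  | _, _ => d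

def headers_list_to_map_alt (headers : List (List (String × String))) : List (String × List String) :=
  (headers.foldl hlmStepB PySem.Dict.empty).items

-- ===== PRECONDITION & SPEC =====
-- Pre_ excludes exactly the headers lacking a 'name' or 'value' key, on which Python A raises KeyError.
def Pre_headers_list_to_map (headers : List (List (String × String))) : Prop :=
  ∀ h ∈ headers, (PySem.Dict.mk h).contains "name" = true ∧ (PySem.Dict.mk h).contains "value" = true
instance (headers : List (List (String × String))) : Decidable (Pre_headers_list_to_map headers) := by unfold Pre_headers_list_to_map; infer_instance

def pvWitness_headers_list_to_map : (List (List (String × String))) :=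
  [[("name", "X-Tag"), ("value", "b")], [("name", "x-tag"), ("value", "a")], [("name", "Host"), ("value", "h")]]

def Spec_headers_list_to_map (headers : List (List (String × String))) (out : List (String × List String)) : Prop := out = headers_list_to_map_alt headers
instance (headers : List (List (String × String))) (out : List (String × List String)) : Decidable (Spec_headers_list_to_map headers out) := by unfold Spec_headers_list_to_map; infer_instance

-- ===== CLAIM (what is proved, stated in full; the proofs are below) =====
def Claim_equal_headers_list_to_map : Prop := ∀ (headers : List (List (String × String))), Dom_headers_list_to_map headers → Pre_headers_list_to_map headers → Spec_headers_list_to_map headers (headers_list_to_map headers)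

-- ===== LEMMAS AND PROOFS =====

-- the per-entry transform A's final pass applies to each group
def hlmSort (p : String × List String) : String × List String := (p.1, PySem.List.sorted p.2 (fun x => x))

theorem insortStr_eq_insertBy (v : String) (xs : List String) :
    insortStr v xs = PySem.List.insertBy (fun a b => decide (a < b)) v xs := by
  induction xs with
  | nil => rfl
  | cons y ys ih => simp [insortStr, PySem.List.insertBy, ih]

theorem insortStr_sorted (l : List String) (v : String) :
    insortStr v (PySem.List.sorted l (fun x => x)) = PySem.List.sorted (l ++ [v]) (fun x => x) := by
  rw [insortStr_eq_insertBy, PySem.List.sorted_eq_foldl_insertBy, PySem.List.sorted_eq_foldl_insertBy,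
    List.foldl_append]
  simp

theorem hlm_step_inv (dA dB : PySem.Dict String (List String)) (h : List (String × String))
    (hitems : dB.items = dA.items.map hlmSort) (hnd : dA.keys.Nodup) :
    (hlmStepB dB h).items = (hlmStepA dA h).items.map hlmSort ∧ (hlmStepA dA h).keys.Nodup := by
  have hkeys : dB.keys = dA.keys := by
    simp only [PySem.Dict.keys, hitems, List.map_map]
    rfl
  unfold hlmStepA hlmStepB
  cases hn : (PySem.Dict.mk h).get? "name" with
  | none => exact ⟨hitems, hnd⟩
  | some name =>
    cases hv : (PySem.Dict.mk h).get? "value" with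
    | none => exact ⟨hitems, hnd⟩
    | some value =>
      simp only []
      set k := PySem.Str.lower name with hk
      have hmod : dA.modify k [] (fun xs => xs ++ [value]) = dA.insert k (dA.getD k [] ++ [value]) := rfl
      rw [hmod]
      have hcont : dB.contains k = dA.contains k := by
        by_cases hmem : k ∈ dA.keys
        · rw [(PySem.Dict.contains_iff_mem_keys dB k).mpr (hkeys ▸ hmem),
            (PySem.Dict.contains_iff_mem_keys dA k).mpr hmem]
        · have h1 : dB.contains k = false := by
            cases hc : dB.contains k with
            | false => rfl
            | true => exact absurd (hkeys ▸ (PySem.Dict.contains_iff_mem_keys dB k).mp hc) hmem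
          have h2 : dA.contains k = false := by
            cases hc : dA.contains k with
            | false => rfl
            | true => exact absurd ((PySem.Dict.contains_iff_mem_keys dA k).mp hc) hmem
          rw [h1, h2]
      refine ⟨?_, PySem.Dict.nodup_keys_insert dA k _ hnd⟩
      by_cases hc : dA.contains k = true
      · -- existing key: both inserts replace in place
        have hcB : dB.contains k = true := by rw [hcont]; exact hc
        -- dA's current group and dB's (sorted) current group
        obtain ⟨w, hw⟩ : ∃ w, (k, w) ∈ dA.items := by
          have : k ∈ dA.keys := (PySem.Dict.contains_iff_mem_keys dA k).mp hc
          simp only [PySem.Dict.keys, List.mem_map] at this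
          obtain ⟨p, hp, hp1⟩ := this
          exact ⟨p.2, by rwa [show (k, p.2) = p by rw [← hp1]]⟩
        have hgA : dA.getD k [] = w := PySem.Dict.getD_of_mem_items dA hw hnd []
        have hndB : dB.keys.Nodup := hkeys ▸ hnd
        have hwB : (k, PySem.List.sorted w (fun x => x)) ∈ dB.items := by
          rw [hitems]
          exact List.mem_map.mpr ⟨(k, w), hw, rfl⟩
        have hgB : dB.getD k [] = PySem.List.sorted w (fun x => x) :=
          PySem.Dict.getD_of_mem_items dB hwB hndB []
        rw [PySem.Dict.items_insert_of_contains dA _ hc, PySem.Dict.items_insert_of_contains dB _ hcB,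
          hitems, List.map_map, List.map_map]
        refine List.map_congr_left (fun p hp => ?_)
        by_cases hpk : p.1 = k
        · simp only [Function.comp, hlmSort, hpk, beq_self_eq_true, if_true, hgA, hgB,
            insortStr_sorted]
        · simp only [Function.comp, hlmSort, beq_iff_eq, hpk, if_false]
      · -- new key: both inserts append at the end
        have hc' : dA.contains k = false := by
          cases hcc : dA.contains k with
          | false => rfl
          | true => exact absurd hcc hc
        have hcB : dB.contains k = false := by rw [hcont]; exact hc'
        have hgB : dB.getD k [] = [] := PySem.Dict.getD_of_not_contains dB [] hcB
        rw [PySem.Dict.items_insert_of_not_contains dA _ hc', PySem.Dict.items_insert_of_not_contains dB _ hcB,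
          hitems, List.map_append, hgB, PySem.Dict.getD_of_not_contains dA [] hc']
        simp [insortStr, hlmSort, PySem.List.sorted_eq_foldl_insertBy, PySem.List.insertBy]

theorem hlm_fold_inv (headers : List (List (String × String)))
    (dA dB : PySem.Dict String (List String))
    (hitems : dB.items = dA.items.map hlmSort) (hnd : dA.keys.Nodup) :
    (headers.foldl hlmStepB dB).items = (headers.foldl hlmStepA dA).items.map hlmSort := by
  induction headers generalizing dA dB with
  | nil => exact hitems
  | cons h hs ih =>
    obtain ⟨h1, h2⟩ := hlm_step_inv dA dB h hitems hnd
    exact ih _ _ h1 h2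

-- ===== VERDICT (by name: the statement is the Claim_ definition above) =====
theorem headers_list_to_map_spec : Claim_equal_headers_list_to_map := by
  intro headers _ _
  unfold Spec_headers_list_to_map headers_list_to_map headers_list_to_map_alt
  exact (hlm_fold_inv headers PySem.Dict.empty PySem.Dict.empty rfl (by exact PySem.Dict.nodup_keys_empty)).symm
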